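-- pv_equiv track=rewrite | github.com/jchy20/how-much-backtrack | reasoning-gym/reasoning_gym/arc/arc_1d_tasks.py | transform_mark_size_two_blocks
-- ===== SOURCE A (Python) =====
-- def transform_mark_size_two_blocks(input_grid: list[int]) -> list[int]:
--     size = len(input_grid)
--     output = input_grid.copy()
--
--     i = 0
--     while i < size:
--         # detect start of a non-zero run
--         if input_grid[i] != 0:
--             start = i
--             # advance to end of run
--             while i < size and input_grid[i] != 0:
--                 i += 1
--             length = i - start
--             # if it's size‑2, place markers
--             if length == 2:
--                 if start - 1 >= 0:
--                     output[start - 1] = 3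
--                 end = start + length - 1
--                 if end + 1 < size:
--                     output[end + 1] = 3
--         else:
--             i += 1
--
--     return output
-- ===== SOURCE B (Python) =====
-- def transform_mark_size_two_blocks(input_grid: list[int]) -> list[int]:
--     n = len(input_grid)
--     # pass 1: collect maximal nonzero runs as (start, end) index pairs
--     runs = []
--     start = None
--     for i, x in enumerate(input_grid):
--         if x != 0:
--             if start is None:
--                 start = i
--         else:
--             if start is not None:
--                 runs.append((start, i - 1))
--                 start = None
--     if start is not None:
--         runs.append((start, n - 1))
--     # pass 2: mark neighbors of runs of length exactly 2
--     out = list(input_grid)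
--     for s, e in runs:
--         if e - s + 1 == 2:
--             if s - 1 >= 0:
--                 out[s - 1] = 3
--             if e + 1 < n:
--                 out[e + 1] = 3
--     return out
-- ===== Notes on version B (the rewrite author's own statement) =====
-- stated objective: alternative
-- what changed: A's single interleaved while-loop that scans for a nonzero run and marks its neighbors in place is replaced by two separate passes: first collect all maximal nonzero runs as (start, end) pairs via enumerate, then mark the neighbors of the length-2 runs from that run table on a copy of the input.
import Mathlib
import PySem

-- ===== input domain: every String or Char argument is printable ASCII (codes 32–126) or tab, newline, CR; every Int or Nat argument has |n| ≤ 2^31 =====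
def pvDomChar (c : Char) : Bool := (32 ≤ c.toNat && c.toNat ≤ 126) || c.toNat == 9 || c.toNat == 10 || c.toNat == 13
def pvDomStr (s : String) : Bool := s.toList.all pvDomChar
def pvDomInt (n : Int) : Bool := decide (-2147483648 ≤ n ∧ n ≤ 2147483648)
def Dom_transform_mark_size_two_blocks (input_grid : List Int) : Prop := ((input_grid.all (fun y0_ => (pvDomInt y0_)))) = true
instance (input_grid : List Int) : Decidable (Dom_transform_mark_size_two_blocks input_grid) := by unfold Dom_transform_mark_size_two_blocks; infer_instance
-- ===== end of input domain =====

-- B replaces A's interleaved scan-and-mark while loop by a run-list pass (collect maximal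
-- nonzero runs as (start,end) pairs) followed by a separate marking pass; objective: alternative.

-- ===== PORT A =====
-- inner `while i < size and input_grid[i] != 0: i += 1`
def runAdvance (g : List Int) (i : Nat) : Nat :=
  if h : i < g.length then
    if g.getD i 0 ≠ 0 then runAdvance g (i + 1) else i
  else i
termination_by g.length - i
decreasing_by omega

-- needed for loopA's termination (cited by decreasing_by)
theorem runAdvance_ge (g : List Int) (i : Nat) : i ≤ runAdvance g i := by
  fun_induction runAdvance g i <;> omega

theorem runAdvance_gt (g : List Int) (i : Nat) (h : i < g.length)
    (hx : g.getD i 0 ≠ 0) : i < runAdvance g i := by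
  rw [runAdvance, dif_pos h, if_pos hx]
  have := runAdvance_ge g (i + 1); omega

-- outer `while i < size` loop of A
def loopA (g : List Int) (i : Nat) (out : List Int) : List Int :=
  if h : i < g.length then
    if hx : g.getD i 0 ≠ 0 then
      let start := i
      let i2 := runAdvance g i
      let length := i2 - start
      let out2 :=
        if length = 2 then
          let out1 := if 1 ≤ start then out.set (start - 1) 3 else out
          let e := start + length - 1
          if e + 1 < g.length then out1.set (e + 1) 3 else out1
        else out
      loopA g i2 out2
    else loopA g (i + 1) out
  else out
termination_by g.length - i
decreasing_by
  · have := runAdvance_gt g i h hx; omega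
  · omega

def transform_mark_size_two_blocks (input_grid : List Int) : List Int :=
  loopA input_grid 0 input_grid

-- ===== PORT B =====
-- state of B's run-collecting for-loop: (runs, start, counter i of enumerate)
def stepB (st : List (Nat × Nat) × Option Nat × Nat) (x : Int) :
    List (Nat × Nat) × Option Nat × Nat :=
  let (runs, start, i) := st
  if x ≠ 0 then
    match start with
    | none => (runs, some i, i + 1)
    | some s => (runs, some s, i + 1)
  else
    match start with
    | some s => (runs ++ [(s, i - 1)], none, i + 1)
    | none => (runs, none, i + 1)

-- one step of B's marking loop over the run list
def markB (n : Nat) (out : List Int) (se : Nat × Nat) : List Int :=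
  if se.2 - se.1 + 1 = 2 then
    let out1 := if 1 ≤ se.1 then out.set (se.1 - 1) 3 else out
    if se.2 + 1 < n then out1.set (se.2 + 1) 3 else out1
  else out

def transform_mark_size_two_blocks_alt (input_grid : List Int) : List Int :=
  let st := input_grid.foldl stepB ([], none, 0)
  let runs : List (Nat × Nat) :=
    match st.2.1 with
    | some s => st.1 ++ [(s, input_grid.length - 1)]
    | none => st.1
  runs.foldl (markB input_grid.length) input_grid

-- ===== PRECONDITION & SPEC =====
def Spec_transform_mark_size_two_blocks (input_grid : List Int) (out : List Int) : Prop := out = transform_mark_size_two_blocks_alt input_grid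
instance (input_grid : List Int) (out : List Int) : Decidable (Spec_transform_mark_size_two_blocks input_grid out) := by unfold Spec_transform_mark_size_two_blocks; infer_instance

-- ===== CLAIM (what is proved, stated in full; the proofs are below) =====
def Claim_equal_transform_mark_size_two_blocks : Prop := ∀ (input_grid : List Int), Dom_transform_mark_size_two_blocks input_grid → Spec_transform_mark_size_two_blocks input_grid (transform_mark_size_two_blocks input_grid)

-- ===== LEMMAS AND PROOFS =====

-- canonical run list of the suffix starting at absolute index i
def runsOf (i : Nat) (t : List Int) : List (Nat × Nat) :=
  match t with
  | [] => []
  | x :: t' =>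
    if x = 0 then runsOf (i + 1) t'
    else (i, i + (t'.takeWhile (· != 0)).length) ::
         runsOf (i + (t'.takeWhile (· != 0)).length + 1) (t'.dropWhile (· != 0))
termination_by t.length
decreasing_by
  · simp
  · have := t'.length_dropWhile_le (· != 0); simp; omega

theorem runAdvance_eq (g : List Int) (i : Nat) :
    runAdvance g i = i + ((g.drop i).takeWhile (· != 0)).length := by
  fun_induction runAdvance g i with
  | case1 i h hx ih =>
    have hgi : g.getD i 0 = g[i] := List.getD_eq_getElem g 0 h
    have hb : (g[i] != 0) = true := by rw [← hgi]; simpa using hx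
    rw [ih, List.drop_eq_getElem_cons h, List.takeWhile_cons, hb]
    simp; omega
  | case2 i h hx =>
    have hgi : g.getD i 0 = g[i] := List.getD_eq_getElem g 0 h
    have hb : (g[i] != 0) = false := by rw [← hgi]; simpa using hx
    rw [List.drop_eq_getElem_cons h, List.takeWhile_cons, hb]
    simp
  | case3 i h =>
    rw [List.drop_eq_nil_of_le (by omega)]
    simp

theorem dropWhile_eq_drop {α : Type} (p : α → Bool) (l : List α) :
    l.dropWhile p = l.drop (l.takeWhile p).length := by
  induction l with
  | nil => simp
  | cons x t ih =>
    by_cases hx : p x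
    · simp [hx, ih]
    · simp [hx]

-- A's inline marking of a length-(twl+1) run starting at i equals markB on (i, i + twl)
theorem mark_eq (n : Nat) (out : List Int) (i twl : Nat) :
    (if twl + 1 = 2 then
        (if (i + (twl + 1) - 1) + 1 < n then
            (if 1 ≤ i then out.set (i - 1) 3 else out).set ((i + (twl + 1) - 1) + 1) 3
         else (if 1 ≤ i then out.set (i - 1) 3 else out))
      else out) = markB n out (i, i + twl) := by
  rw [markB]
  by_cases h1 : twl = 1
  · subst h1
    have e1 : i + (1 + 1) - 1 + 1 = i + 1 + 1 := by omega
    have e2 : (i + 1) - i + 1 = 2 := by omega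
    simp only [e1, e2]
  · have c1 : ¬ (twl + 1 = 2) := by omega
    have c2 : ¬ ((i + twl) - i + 1 = 2) := by omega
    rw [if_neg c1]
    simp only [c2, if_false]

theorem loopA_eq (g : List Int) (i : Nat) (out : List Int) :
    loopA g i out = (runsOf i (g.drop i)).foldl (markB g.length) out := by
  fun_induction loopA g i out with
  | case1 i out h hx start i2 len out2 ih =>
    have hgi : g.getD i 0 = g[i] := List.getD_eq_getElem g 0 h
    have hxi : g[i] ≠ 0 := by rw [← hgi]; exact hx
    have hb : (g[i] != 0) = true := by simpa using hxi
    have hdrop := List.drop_eq_getElem_cons h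
    have hA : i2 = i + 1 + ((g.drop (i + 1)).takeWhile (· != 0)).length := by
      show runAdvance g i = _
      rw [runAdvance_eq, hdrop, List.takeWhile_cons, hb]
      simp; omega
    set twl := ((g.drop (i + 1)).takeWhile (· != 0)).length with htwl
    have hdw : (g.drop (i + 1)).dropWhile (· != 0) = g.drop i2 := by
      rw [dropWhile_eq_drop, List.drop_drop]
      congr 1; omega
    have hruns : runsOf i (g.drop i) = (i, i + twl) :: runsOf i2 (g.drop i2) := by
      rw [hdrop, runsOf, if_neg hxi, hdw]
      have : i + twl + 1 = i2 := by omega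
      rw [this]
    rw [ih, hruns, List.foldl_cons]
    congr 1
    have hlen2 : i2 - i = twl + 1 := by omega
    show (if i2 - i = 2 then
        (if (i + (i2 - i) - 1) + 1 < g.length then
            (if 1 ≤ i then out.set (i - 1) 3 else out).set ((i + (i2 - i) - 1) + 1) 3
         else (if 1 ≤ i then out.set (i - 1) 3 else out))
      else out) = markB g.length out (i, i + twl)
    rw [hlen2]
    exact mark_eq g.length out i twl
  | case2 i out h hx ih =>
    have hgi : g.getD i 0 = g[i] := List.getD_eq_getElem g 0 h
    have hx0 : g[i] = 0 := by rw [← hgi]; simpa using hx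
    rw [ih, List.drop_eq_getElem_cons h, runsOf, if_pos hx0]
  | case3 i out h =>
    rw [List.drop_eq_nil_of_le (by omega), runsOf, List.foldl_nil]

-- closing step of B: if a run is still open at the end, it ends at index m
def finishAt (m : Nat) (st : List (Nat × Nat) × Option Nat × Nat) : List (Nat × Nat) :=
  match st.2.1 with
  | some s => st.1 ++ [(s, m)]
  | none => st.1

theorem stepB_fold (t : List Int) :
    (∀ i acc, finishAt (i + t.length - 1) (t.foldl stepB (acc, none, i)) = acc ++ runsOf i t) ∧
    (∀ i acc s, finishAt (i + t.length - 1) (t.foldl stepB (acc, some s, i)) =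
      acc ++ (s, i + (t.takeWhile (· != 0)).length - 1) ::
        runsOf (i + (t.takeWhile (· != 0)).length) (t.dropWhile (· != 0))) := by
  induction t with
  | nil =>
    constructor
    · intro i acc; simp [finishAt, runsOf]
    · intro i acc s; simp [finishAt, runsOf]
  | cons x t' ih =>
    obtain ⟨ihn, ihs⟩ := ih
    have hm : ∀ j : Nat, j + (x :: t').length - 1 = (j + 1) + t'.length - 1 := by
      intro j; simp only [List.length_cons]; omega
    constructor
    · intro i acc
      rw [List.foldl_cons, hm i]
      by_cases hx : x = 0
      · subst hx
        have hstep : stepB (acc, none, i) 0 = (acc, none, i + 1) := by simp [stepB]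
        rw [hstep, ihn, runsOf, if_pos rfl]
      · have hstep : stepB (acc, none, i) x = (acc, some i, i + 1) := by simp [stepB, hx]
        rw [hstep, ihs, runsOf, if_neg hx]
        have e1 : i + 1 + (t'.takeWhile (· != 0)).length - 1
            = i + (t'.takeWhile (· != 0)).length := by omega
        have e2 : i + 1 + (t'.takeWhile (· != 0)).length
            = i + (t'.takeWhile (· != 0)).length + 1 := by omega
        rw [e1, e2]
    · intro i acc s
      rw [List.foldl_cons, hm i]
      by_cases hx : x = 0
      · subst hx
        have hstep : stepB (acc, some s, i) 0 = (acc ++ [(s, i - 1)], none, i + 1) := by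
          simp [stepB]
        rw [hstep, ihn, List.takeWhile_cons, List.dropWhile_cons]
        have hb : ((0 : Int) != 0) = false := rfl
        rw [hb]
        simp only [Bool.false_eq_true, if_false, List.length_nil, Nat.add_zero]
        rw [runsOf, if_pos rfl]
        simp
      · have hstep : stepB (acc, some s, i) x = (acc, some s, i + 1) := by simp [stepB, hx]
        rw [hstep, ihs, List.takeWhile_cons, List.dropWhile_cons]
        have hb : (x != 0) = true := by simpa using hx
        rw [hb]
        simp only [if_true, List.length_cons]
        have e1 : i + 1 + (t'.takeWhile (· != 0)).length - 1
            = i + ((t'.takeWhile (· != 0)).length + 1) - 1 := by omega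
        have e2 : i + 1 + (t'.takeWhile (· != 0)).length
            = i + ((t'.takeWhile (· != 0)).length + 1) := by omega
        rw [e1, e2]

theorem collectB_eq (g : List Int) :
    (match (g.foldl stepB ([], none, 0)).2.1 with
      | some s => (g.foldl stepB ([], none, 0)).1 ++ [(s, g.length - 1)]
      | none => (g.foldl stepB ([], none, 0)).1) = runsOf 0 g := by
  have := (stepB_fold g).1 0 []
  simpa [finishAt] using this

-- ===== VERDICT (by name: the statement is the Claim_ definition above) =====
theorem transform_mark_size_two_blocks_spec : Claim_equal_transform_mark_size_two_blocks := by
  intro g _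
  show transform_mark_size_two_blocks g = transform_mark_size_two_blocks_alt g
  rw [transform_mark_size_two_blocks, transform_mark_size_two_blocks_alt, loopA_eq]
  simp only [List.drop_zero]
  rw [collectB_eq]
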